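-- pv_equiv track=rewrite | github.com/88abaa99/SPBE | py_public/BES/NNL01_SD.py | _buildSubsets
-- ===== SOURCE A (Python) =====
-- def _getLeftChild(node):
--     return 2 * node + 1
--
-- def _getRightChild(node):
--     return 2 * node + 2
--
-- def _buildSubsets(SteinerTree):
--     """!
--     Génération des subsets S_(i,j) à partir de l'arbre de Steiner.
--
--     @param SteinerTree: (list of Booleans) arbre de Steiner
--     @return:(list of (i,j) as integers) liste des couples (i,j).
--     """
--     # Cas particulier, SteinerTree vide
--     if SteinerTree[0] == 0:
--         return []
--
--     # Cas général
--     subsets = []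
--     # Pile de taille max la profondeur de l'arbre
--     stack = [0]  # racine de l'arbre à l'initialisation
--     while len(stack) > 0:
--         node = stack.pop()  # début de la chaine maximale de degrée 1
--         start = node
--         stop = None
--         while stop is None:
--             if 2 * node + 1 >= len(SteinerTree):  # Si le noeud est une feuille
--                 stop = node  # Fin de la chaine maximale de degrée 1
--                 if start != stop:
--                     subsets.append((start, stop))  # Subset (i,j)
--             elif SteinerTree[_getLeftChild(node)] and SteinerTree[_getRightChild(node)]:  # Si le noeud et de degrée 2
--                 stack += [_getRightChild(node), _getLeftChild(node)]  # Noeuds fils à explorer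
--                 stop = node  # Fin de la chaine maximale de degrée 1
--                 if start != stop:
--                     subsets.append((start, stop))  # Subset (i,j)
--             elif SteinerTree[_getLeftChild(node)]:  # Degrée 1, fils gauche seulement
--                 node = _getLeftChild(node)
--             elif SteinerTree[_getRightChild(node)]:  # Degrée 1, fils droit seulement
--                 node = _getRightChild(node)
--     return subsets
-- ===== SOURCE B (Python) =====
-- def _buildSubsets(SteinerTree):
--     # Recursive decomposition: walk(start) descends the degree-1 chain and recurses
--     # at degree-2 nodes (left first), instead of an explicit stack loop.
--     if SteinerTree[0] == 0:
--         return []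
--     subsets = []
--
--     def walk(start):
--         node = start
--         while True:
--             if 2 * node + 1 >= len(SteinerTree):  # leaf
--                 if start != node:
--                     subsets.append((start, node))
--                 return
--             if SteinerTree[2 * node + 1] and SteinerTree[2 * node + 2]:  # degree 2
--                 if start != node:
--                     subsets.append((start, node))
--                 walk(2 * node + 1)
--                 walk(2 * node + 2)
--                 return
--             if SteinerTree[2 * node + 1]:
--                 node = 2 * node + 1
--             elif SteinerTree[2 * node + 2]:
--                 node = 2 * node + 2
--
--     walk(0)
--     return subsets
-- ===== Notes on version B (the rewrite author's own statement) =====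
-- stated objective: alternative
-- what changed: Replaces the explicit stack/worklist loop with a recursive walk(start) that descends each degree-1 chain and recurses into both children at degree-2 nodes, building the result by left-first recursion instead of pushing [right,left] onto a stack.
import Mathlib
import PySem

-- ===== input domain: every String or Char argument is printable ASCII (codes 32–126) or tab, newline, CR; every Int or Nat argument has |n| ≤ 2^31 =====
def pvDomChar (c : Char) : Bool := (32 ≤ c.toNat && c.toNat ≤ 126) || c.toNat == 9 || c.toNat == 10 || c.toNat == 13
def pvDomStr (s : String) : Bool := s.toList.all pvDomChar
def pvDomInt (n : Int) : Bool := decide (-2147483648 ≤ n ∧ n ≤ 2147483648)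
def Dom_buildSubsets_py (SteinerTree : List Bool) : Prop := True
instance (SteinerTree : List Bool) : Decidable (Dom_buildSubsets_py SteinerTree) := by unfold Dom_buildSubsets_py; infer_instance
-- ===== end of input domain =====

-- B replaces A's explicit stack loop by a recursive left-first walk; same cost, different decomposition.
-- Equivalence is about the return value only (neither program mutates its argument).
-- The `fuel` parameters below are pure totality guards (Python's loops carry none); on every input
-- admitted by Pre_ the stated fuel provably never runs out, and outside Pre_ the Python raises or diverges.

-- ===== PORT A =====
-- out-of-range getD reads are false; Pre_ guarantees every index A actually reads is in range
-- (outside Pre_ the Python A raises IndexError or loops forever).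

-- A's inner `while stop is None` chain: from `node`, returns the final `stop`.
-- The chain node strictly increases and stays below ST.length, so fuel = ST.length suffices.
def chainA (ST : List Bool) (fuel node : Nat) : Nat :=
  match fuel with
  | 0 => node   -- never reached when ST.length - node ≤ fuel
  | fuel + 1 =>
    if ST.length ≤ 2 * node + 1 then node                                          -- leaf
    else if ST.getD (2 * node + 1) false && ST.getD (2 * node + 2) false then node -- degree 2
    else if ST.getD (2 * node + 1) false then chainA ST fuel (2 * node + 1)        -- descend left
    else if ST.getD (2 * node + 2) false then chainA ST fuel (2 * node + 2)        -- descend right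
    else node   -- Python A never leaves this iteration (Pre_ excludes it)

-- A's outer `while len(stack) > 0` loop; the Python stack's top is the list head here.
-- Each pop of `node` pushes at most two strictly larger nodes below ST.length, so the
-- iteration count is below 3 ^ ST.length.
def loopA (ST : List Bool) (fuel : Nat) (stack : List Nat) (subsets : List (Int × Int)) : List (Int × Int) :=
  match fuel with
  | 0 => subsets   -- never reached with the initial fuel 3 ^ ST.length
  | fuel + 1 =>
    match stack with
    | [] => subsets
    | node :: rest =>
      let s := chainA ST ST.length node
      let subsets' := if node ≠ s then subsets ++ [((node : Int), (s : Int))] else subsets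
      if ST.getD (2 * s + 1) false && ST.getD (2 * s + 2) false then
        loopA ST fuel ((2 * s + 1) :: (2 * s + 2) :: rest) subsets'  -- stack += [right, left]
      else
        loopA ST fuel rest subsets'

def buildSubsets_py (SteinerTree : List Bool) : List (Int × Int) :=
  if SteinerTree.getD 0 false = false then []        -- `if SteinerTree[0] == 0: return []`
  else loopA SteinerTree (3 ^ SteinerTree.length) [0] []

-- ===== PORT B =====
-- B's `walk(start)`: `node` descends the chain; at a leaf or degree-2 stop it emits
-- (start, node) when start ≠ node, and at a degree-2 node recurses left then right.
-- The recursion node strictly increases and stays below ST.length, so fuel = ST.length suffices.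
def walkB (ST : List Bool) (fuel : Nat) (start node : Nat) : List (Int × Int) :=
  match fuel with
  | 0 => []   -- never reached when 0 < fuel and ST.length - node ≤ fuel
  | fuel + 1 =>
    if ST.length ≤ 2 * node + 1 then                                           -- leaf: return
      (if start ≠ node then [((start : Int), (node : Int))] else [])
    else if ST.getD (2 * node + 1) false && ST.getD (2 * node + 2) false then  -- degree 2
      (if start ≠ node then [((start : Int), (node : Int))] else [])
        ++ walkB ST fuel (2 * node + 1) (2 * node + 1) ++ walkB ST fuel (2 * node + 2) (2 * node + 2)
    else if ST.getD (2 * node + 1) false then walkB ST fuel start (2 * node + 1)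
    else if ST.getD (2 * node + 2) false then walkB ST fuel start (2 * node + 2)
    else (if start ≠ node then [((start : Int), (node : Int))] else [])
    -- last branch: Python B never leaves this iteration (Pre_ excludes it)

def buildSubsets_py_alt (SteinerTree : List Bool) : List (Int × Int) :=
  if SteinerTree.getD 0 false = false then []
  else walkB SteinerTree SteinerTree.length 0 0

-- ===== PRECONDITION & SPEC =====
-- `i` is reachable iff `i` and all its ancestors up to the root are marked true;
-- in 1-based heap indexing the ancestors of i are exactly (i+1)/2^k - 1.
def pvReach (ST : List Bool) (i : Nat) : Bool :=
  (List.range (i + 2)).all (fun k => (i + 1) / 2 ^ k = 0 || ST.getD ((i + 1) / 2 ^ k - 1) false)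

-- Pre_ holds exactly where Python A returns normally: the tree is non-empty and every
-- reachable inner node has its right-child index in range and at least one child marked
-- (otherwise A raises IndexError or its inner loop never terminates).
def Pre_buildSubsets_py (SteinerTree : List Bool) : Prop :=
  SteinerTree ≠ [] ∧
  ∀ i < SteinerTree.length, pvReach SteinerTree i = true → 2 * i + 1 < SteinerTree.length →
    2 * i + 2 < SteinerTree.length ∧
      (SteinerTree.getD (2 * i + 1) false = true ∨ SteinerTree.getD (2 * i + 2) false = true)
instance (SteinerTree : List Bool) : Decidable (Pre_buildSubsets_py SteinerTree) := by
  unfold Pre_buildSubsets_py; infer_instance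

def pvWitness_buildSubsets_py : List Bool := [true, true, false, true, false]

def Spec_buildSubsets_py (SteinerTree : List Bool) (out : List (Int × Int)) : Prop := out = buildSubsets_py_alt SteinerTree
instance (SteinerTree : List Bool) (out : List (Int × Int)) : Decidable (Spec_buildSubsets_py SteinerTree out) := by unfold Spec_buildSubsets_py; infer_instance

-- ===== CLAIM (what is proved, stated in full; the proofs are below) =====
def Claim_equal_buildSubsets_py : Prop := ∀ (SteinerTree : List Bool), Dom_buildSubsets_py SteinerTree → Pre_buildSubsets_py SteinerTree → Spec_buildSubsets_py SteinerTree (buildSubsets_py SteinerTree)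

-- ===== LEMMAS AND PROOFS =====

theorem pvGetD_true_lt (ST : List Bool) (i : Nat) (h : ST.getD i false = true) : i < ST.length := by
  by_contra hge
  rw [List.getD_eq_getElem?_getD, List.getElem?_eq_none (by omega)] at h
  simp at h

-- the walk result does not depend on the fuel either (0 < fuel and fuel covers ST.length - node)
theorem walkB_congr (ST : List Bool) : ∀ (f f' start node : Nat),
    0 < f → 0 < f' → ST.length - node ≤ f → ST.length - node ≤ f' →
    walkB ST f start node = walkB ST f' start node := by
  intro f
  induction f with
  | zero => intro _ _ _ h0 _ _ _; omega
  | succ f ih =>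
    intro f' start node _ h0' hf hf'
    cases f' with
    | zero => omega
    | succ f' =>
      rw [walkB, walkB]
      by_cases hleaf : ST.length ≤ 2 * node + 1
      · rw [if_pos hleaf, if_pos hleaf]
      · rw [if_neg hleaf, if_neg hleaf]
        by_cases hdeg : (ST.getD (2 * node + 1) false && ST.getD (2 * node + 2) false) = true
        · rw [if_pos hdeg, if_pos hdeg]
          have hdeg' := hdeg
          simp only [Bool.and_eq_true] at hdeg'
          have h1 := pvGetD_true_lt ST _ hdeg'.1
          have h2 := pvGetD_true_lt ST _ hdeg'.2
          rw [ih f' (2 * node + 1) (2 * node + 1) (by omega) (by omega) (by omega) (by omega),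
              ih f' (2 * node + 2) (2 * node + 2) (by omega) (by omega) (by omega) (by omega)]
        · rw [if_neg hdeg, if_neg hdeg]
          by_cases hl : ST.getD (2 * node + 1) false = true
          · rw [if_pos hl, if_pos hl]
            have hlt := pvGetD_true_lt ST _ hl
            exact ih f' start (2 * node + 1) (by omega) (by omega) (by omega) (by omega)
          · rw [if_neg hl, if_neg hl]
            by_cases hr : ST.getD (2 * node + 2) false = true
            · rw [if_pos hr, if_pos hr]
              have hlt := pvGetD_true_lt ST _ hr
              exact ih f' start (2 * node + 2) (by omega) (by omega) (by omega) (by omega)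
            · rw [if_neg hr, if_neg hr]

-- walkB as "emit the chain's endpoint pair, then recurse at the stop if it has degree 2":
-- aligns B's merged recursion with A's chainA/loopA split.
theorem walkB_chain (ST : List Bool) : ∀ (f start node : Nat),
    0 < f → ST.length - node ≤ f →
    walkB ST f start node =
      (if start ≠ chainA ST f node then [((start : Int), ((chainA ST f node : Nat) : Int))] else [])
        ++ (if ST.getD (2 * chainA ST f node + 1) false && ST.getD (2 * chainA ST f node + 2) false then
              walkB ST ST.length (2 * chainA ST f node + 1) (2 * chainA ST f node + 1)
                ++ walkB ST ST.length (2 * chainA ST f node + 2) (2 * chainA ST f node + 2)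
            else []) := by
  intro f
  induction f with
  | zero => intro _ _ h0 _; omega
  | succ f ih =>
    intro start node _ hf
    rw [walkB, chainA]
    by_cases hleaf : ST.length ≤ 2 * node + 1
    · rw [if_pos hleaf, if_pos hleaf]
      have h1 : ST.getD (2 * node + 1) false = false := by
        by_contra hx
        have := pvGetD_true_lt ST _ (by simpa using hx)
        omega
      have hb : ¬((ST.getD (2 * node + 1) false && ST.getD (2 * node + 2) false) = true) := by
        rw [h1]; simp
      rw [if_neg hb, List.append_nil]
    · rw [if_neg hleaf, if_neg hleaf]
      by_cases hdeg : (ST.getD (2 * node + 1) false && ST.getD (2 * node + 2) false) = true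
      · rw [if_pos hdeg, if_pos hdeg, if_pos hdeg, List.append_assoc]
        have hdeg' := hdeg
        simp only [Bool.and_eq_true] at hdeg'
        have h1 := pvGetD_true_lt ST _ hdeg'.1
        have h2 := pvGetD_true_lt ST _ hdeg'.2
        rw [walkB_congr ST f ST.length (2 * node + 1) (2 * node + 1)
              (by omega) (by omega) (by omega) (by omega),
            walkB_congr ST f ST.length (2 * node + 2) (2 * node + 2)
              (by omega) (by omega) (by omega) (by omega)]
      · rw [if_neg hdeg, if_neg hdeg]
        by_cases hl : ST.getD (2 * node + 1) false = true
        · rw [if_pos hl, if_pos hl]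
          have hlt := pvGetD_true_lt ST _ hl
          exact ih start (2 * node + 1) (by omega) (by omega)
        · rw [if_neg hl, if_neg hl]
          by_cases hr : ST.getD (2 * node + 2) false = true
          · rw [if_pos hr, if_pos hr]
            have hlt := pvGetD_true_lt ST _ hr
            exact ih start (2 * node + 2) (by omega) (by omega)
          · rw [if_neg hr, if_neg hr, if_neg hdeg, List.append_nil]

-- the loop measure strictly drops when a popped node is replaced by its stop's two children
theorem pvLoopDec_push (ST : List Bool) (node s : Nat) (rest : List Nat)
    (hs : node ≤ s) (h2 : 2 * s + 2 < ST.length) :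
    (((2 * s + 1) :: (2 * s + 2) :: rest).map (fun x => 3 ^ (ST.length - x))).sum
      < ((node :: rest).map (fun x => 3 ^ (ST.length - x))).sum := by
  simp only [List.map_cons, List.sum_cons]
  have e1 : 3 ^ (ST.length - (2 * s + 1)) ≤ 3 ^ (ST.length - node - 1) :=
    Nat.pow_le_pow_right (by omega) (by omega)
  have e2 : 3 ^ (ST.length - (2 * s + 2)) ≤ 3 ^ (ST.length - node - 1) :=
    Nat.pow_le_pow_right (by omega) (by omega)
  have e3 : 3 ^ (ST.length - node) = 3 * 3 ^ (ST.length - node - 1) := by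
    rw [← pow_succ']
    congr 1
    omega
  have e4 : 0 < 3 ^ (ST.length - node - 1) := Nat.pow_pos (by omega)
  omega

-- the chain result is at least its argument
theorem chainA_ge (ST : List Bool) : ∀ (f node : Nat), node ≤ chainA ST f node := by
  intro f
  induction f with
  | zero => intro node; rw [chainA]
  | succ f ih =>
    intro node
    rw [chainA]
    split
    · exact le_refl node
    · split
      · exact le_refl node
      · split
        · exact le_trans (by omega) (ih (2 * node + 1))
        · split
          · exact le_trans (by omega) (ih (2 * node + 2))
          · exact le_refl node

-- A's worklist loop is the accumulator plus the concatenation of B's walks over the stack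
theorem loopA_eq_flatMap (ST : List Bool) (hlen : 0 < ST.length) : ∀ (fuel : Nat) (stack : List Nat) (subsets : List (Int × Int)),
    (stack.map (fun x => 3 ^ (ST.length - x))).sum ≤ fuel →
    loopA ST fuel stack subsets = subsets ++ stack.flatMap (fun n => walkB ST ST.length n n) := by
  intro fuel
  induction fuel with
  | zero =>
    intro stack subsets hm
    cases stack with
    | nil => simp [loopA]
    | cons node rest =>
      exfalso
      simp only [List.map_cons, List.sum_cons] at hm
      have : 0 < 3 ^ (ST.length - node) := Nat.pow_pos (by omega)
      omega
  | succ fuel ih =>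
    intro stack subsets hm
    cases stack with
    | nil => simp [loopA]
    | cons node rest =>
      rw [loopA]
      have hwc := walkB_chain ST ST.length node node (by omega) (by omega)
      simp only [List.flatMap_cons]
      by_cases hdeg : (ST.getD (2 * chainA ST ST.length node + 1) false
          && ST.getD (2 * chainA ST ST.length node + 2) false) = true
      · rw [if_pos hdeg]
        have hdeg' := hdeg
        simp only [Bool.and_eq_true] at hdeg'
        have h2 := pvGetD_true_lt ST _ hdeg'.2
        have hlt := pvLoopDec_push ST node (chainA ST ST.length node) rest (chainA_ge ST _ _) h2
        rw [ih _ _ (by omega)]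
        rw [hwc, if_pos hdeg]
        simp only [List.flatMap_cons]
        split <;> simp [List.append_assoc]
      · rw [if_neg hdeg]
        have hrest : (rest.map (fun x => 3 ^ (ST.length - x))).sum ≤ fuel := by
          simp only [List.map_cons, List.sum_cons] at hm
          have : 0 < 3 ^ (ST.length - node) := Nat.pow_pos (by omega)
          omega
        rw [ih _ _ hrest]
        rw [hwc, if_neg hdeg, List.append_nil]
        split <;> simp [List.append_assoc]

-- ===== VERDICT (by name: the statement is the Claim_ definition above) =====
theorem buildSubsets_py_spec : Claim_equal_buildSubsets_py := by
  intro ST _ _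
  unfold Spec_buildSubsets_py buildSubsets_py buildSubsets_py_alt
  by_cases h0 : ST.getD 0 false = false
  · rw [if_pos h0, if_pos h0]
  · rw [if_neg h0, if_neg h0]
    have hlen : 0 < ST.length :=
      pvGetD_true_lt ST 0 (by revert h0; cases ST.getD 0 false <;> simp)
    rw [loopA_eq_flatMap ST hlen (3 ^ ST.length) [0] [] (by simp)]
    simp
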